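-- pv_equiv track=rewrite | github.com/XseniaP/AF_evaluation | parse_superimposed.py | check_index
-- ===== SOURCE A (Python) =====
-- def check_index(line_set):
--     index1 = -1
--     index2 = -1
--     for i in range(len(line_set)):
--         if line_set[i] != '' and index1 != -1:
--             index2 = i
--             temp = line_set[i]
--             return temp, index1, index2
--         if line_set[i] == 'A':
--             index1 = i
-- ===== SOURCE B (Python) =====
-- def check_index(line_set):
--     try:
--         i1 = line_set.index('A')
--     except ValueError:
--         return None
--     for j in range(i1 + 1, len(line_set)):
--         if line_set[j] != '':
--             return line_set[j], i1, j
-- ===== Notes on version B (the rewrite author's own statement) =====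
-- stated objective: simpler
-- what changed: Replaces the single stateful loop carrying an index1 sentinel with two phases: list.index('A') to locate the first 'A', then a scan for the next non-empty element.
import Mathlib
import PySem

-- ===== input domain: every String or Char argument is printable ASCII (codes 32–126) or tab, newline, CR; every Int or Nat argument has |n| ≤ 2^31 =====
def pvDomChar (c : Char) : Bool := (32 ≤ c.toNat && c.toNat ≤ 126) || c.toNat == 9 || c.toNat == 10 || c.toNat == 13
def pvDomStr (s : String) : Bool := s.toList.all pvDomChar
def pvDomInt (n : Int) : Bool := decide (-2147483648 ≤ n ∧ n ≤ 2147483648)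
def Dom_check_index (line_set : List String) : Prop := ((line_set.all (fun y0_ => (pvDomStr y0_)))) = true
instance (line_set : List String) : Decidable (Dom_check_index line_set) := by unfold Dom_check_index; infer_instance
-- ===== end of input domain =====

-- B replaces A's single stateful loop (index1 sentinel) with two phases: locate the first 'A'
-- with list.index, then scan for the next non-empty element (objective: simpler).


-- ===== PORT A =====
-- A's loop: i is the running position, index1 the sentinel-initialised first-'A' index.
def checkIndexLoopA : List String → Nat → Int → Option (String × Int × Int)
  | [], _, _ => none
  | x :: rest, i, index1 =>
    if x ≠ "" ∧ index1 ≠ -1 then some (x, index1, (i : Int))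
    else if x = "A" then checkIndexLoopA rest (i + 1) (i : Int)
    else checkIndexLoopA rest (i + 1) index1

def check_index (line_set : List String) : Option (String × Int × Int) :=
  checkIndexLoopA line_set 0 (-1)

-- ===== PORT B =====
-- B's second phase: scan from position j for the first non-empty element.
def checkIndexScanB (i1 : Int) : List String → Nat → Option (String × Int × Int)
  | [], _ => none
  | x :: rest, j => if x ≠ "" then some (x, i1, (j : Int)) else checkIndexScanB i1 rest (j + 1)

def check_index_alt (line_set : List String) : Option (String × Int × Int) :=
  match PySem.List.index? line_set "A" with
  | none => none
  | some i1 => checkIndexScanB (i1 : Int) (line_set.drop (i1 + 1)) (i1 + 1)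

-- ===== PRECONDITION & SPEC =====
def Spec_check_index (line_set : List String) (out : Option (String × Int × Int)) : Prop := out = check_index_alt line_set
instance (line_set : List String) (out : Option (String × Int × Int)) : Decidable (Spec_check_index line_set out) := by unfold Spec_check_index; infer_instance

-- ===== CLAIM (what is proved, stated in full; the proofs are below) =====
def Claim_equal_check_index : Prop := ∀ (line_set : List String), Dom_check_index line_set → Spec_check_index line_set (check_index line_set)

-- ===== LEMMAS AND PROOFS =====

-- Once index1 ≠ -1 is set, A's loop never changes it again (the 'A' branch returns),
-- so it coincides with B's scan for the first non-empty element.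
theorem loopA_eq_scanB (rest : List String) (i : Nat) (i1 : Int) (h : i1 ≠ -1) :
    checkIndexLoopA rest i i1 = checkIndexScanB i1 rest i := by
  induction rest generalizing i with
  | nil => rfl
  | cons x rest ih =>
    by_cases hx : x = ""
    · subst hx
      simp [checkIndexLoopA, checkIndexScanB, ih]
    · simp [checkIndexLoopA, checkIndexScanB, hx, h]

-- Before an 'A' is met, A's loop is B's whole two-phase computation on the suffix.
theorem loopA_eq_alt (rest : List String) (i : Nat) :
    checkIndexLoopA rest i (-1) =
      (match PySem.List.index? rest "A" with
       | none => none
       | some k => checkIndexScanB ((i + k : Nat) : Int) (rest.drop (k + 1)) (i + k + 1)) := by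
  induction rest generalizing i with
  | nil => rfl
  | cons x rest ih
  => by_cases hx : x = "A"
     · subst hx
       rw [PySem.List.index?_cons_self]
       simp only [checkIndexLoopA]
       norm_num
       exact loopA_eq_scanB rest (i + 1) (i : Int) (by omega)
     · rw [PySem.List.index?_cons_of_ne rest hx]
       have hne : ¬ (x ≠ "" ∧ (-1 : Int) ≠ -1) := by simp
       simp only [checkIndexLoopA, if_neg hne, if_neg hx]
       rw [ih (i + 1)]
       cases hk : PySem.List.index? rest "A" with
       | none => simp
       | some k =>
         simp only [Option.map_some]
         have h1 : i + 1 + k = i + (k + 1) := by omega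
         rw [h1]
         rfl

-- ===== VERDICT (by name: the statement is the Claim_ definition above) =====
theorem check_index_spec : Claim_equal_check_index := by
  intro line_set _
  unfold Spec_check_index check_index check_index_alt
  rw [loopA_eq_alt line_set 0]
  cases PySem.List.index? line_set "A" with
  | none => rfl
  | some k => simp
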